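-- pv_equiv track=rewrite | github.com/unchaoss/unchaoss | ops/dirops/dirops.py | get_successively_longer_paths
-- ===== SOURCE A (Python) =====
-- def get_successively_longer_paths(dir_path):
--     assert(dir_path.endswith("/"))
--     successively_longer_paths = []
--     current_path = ""
--     parent = None
--     while("/" in dir_path):
--         index = dir_path.find("/")
--         name = dir_path[:index+1]
--         current_path += name
--         successively_longer_paths.append((current_path, parent))
--         dir_path = dir_path[index+1:]
--         parent = current_path
--     return successively_longer_paths
-- ===== SOURCE B (Python) =====
-- def get_successively_longer_paths(dir_path):
--     assert dir_path.endswith("/")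
--     names = dir_path[:-1].split("/")
--     prefixes = ["/".join(names[:i + 1]) + "/" for i in range(len(names))]
--     return list(zip(prefixes, [None] + prefixes[:-1]))
-- ===== Notes on version B (the rewrite author's own statement) =====
-- stated objective: simpler
-- what changed: A's incremental while-loop that repeatedly finds the next '/' and slices the remaining string is replaced by a single split of the path into segments followed by a comprehension building the cumulative prefixes and a zip pairing each prefix with its predecessor (None for the first).
import Mathlib
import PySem

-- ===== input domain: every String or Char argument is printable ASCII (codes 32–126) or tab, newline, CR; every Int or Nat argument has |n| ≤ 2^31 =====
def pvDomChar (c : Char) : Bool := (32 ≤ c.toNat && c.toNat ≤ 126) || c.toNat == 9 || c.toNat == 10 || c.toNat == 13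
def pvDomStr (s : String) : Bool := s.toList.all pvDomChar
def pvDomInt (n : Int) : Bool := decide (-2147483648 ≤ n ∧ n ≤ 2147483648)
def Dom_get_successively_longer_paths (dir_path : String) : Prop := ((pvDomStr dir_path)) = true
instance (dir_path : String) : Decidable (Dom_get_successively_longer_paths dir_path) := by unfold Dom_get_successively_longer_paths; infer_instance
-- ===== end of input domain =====

-- B replaces A's find-next-'/'-and-slice while loop by one split into segments, a
-- comprehension of cumulative prefixes, and a zip with the shifted prefix list (simpler).

-- ===== PORT A =====
-- termination helper for the while loop: cutting past the first '/' shortens the string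
theorem pvCutA_lt (s : List Char) (h : PySem.Chars.isIn ['/'] s = true) :
    (PySem.List.slice s (some (PySem.Chars.find s ['/'] + 1)) none).length < s.length := by
  have hinf : ['/'] <:+: s := (PySem.Chars.isIn_iff_infix _ _).mp h
  have h0 : (0:Int) ≤ PySem.Chars.find s ['/'] := (PySem.Chars.find_nonneg_iff _ _).mpr hinf
  have h1 : (0:Int) ≤ PySem.Chars.find s ['/'] + 1 := by omega
  rw [PySem.List.slice_from s h1, List.length_drop]
  have hs : 1 ≤ s.length := by
    have := hinf.sublist.length_le; simpa using this
  have : 1 ≤ (PySem.Chars.find s ['/'] + 1).toNat := by omega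
  omega

def pvLoopA (s cur : List Char) (parent : Option String)
    (acc : List (String × Option String)) : List (String × Option String) :=
  if h : PySem.Chars.isIn ['/'] s = true then
    let index : Int := PySem.Chars.find s ['/']
    let name := PySem.List.slice s none (some (index + 1))
    let cur' := cur ++ name
    let acc' := acc ++ [(String.ofList cur', parent)]
    pvLoopA (PySem.List.slice s (some (index + 1)) none) cur' (some (String.ofList cur')) acc'
  else acc
termination_by s.length
decreasing_by exact pvCutA_lt s h

def get_successively_longer_paths (dir_path : String) : List (String × Option String) :=
  if PySem.Str.endswith dir_path "/" = true then
    pvLoopA dir_path.toList [] none []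
  else []   -- the Python assert raises here; excluded by Pre_

-- ===== PORT B =====
def get_successively_longer_paths_alt (dir_path : String) : List (String × Option String) :=
  if PySem.Str.endswith dir_path "/" = true then
    let names := PySem.Chars.splitOn (PySem.List.slice dir_path.toList none (some (-1))) ['/']
    let prefixes := (PySem.List.pyRange 0 names.length 1).map
      (fun i => String.ofList (PySem.Chars.join ['/'] (PySem.List.slice names none (some (i + 1))) ++ ['/']))
    prefixes.zip ((none : Option String) :: (PySem.List.slice prefixes none (some (-1))).map some)
  else []   -- the Python assert raises here; excluded by Pre_

-- ===== PRECONDITION & SPEC =====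
-- Pre_ excludes exactly the inputs on which A's assert raises AssertionError (path not ending in "/").
def Pre_get_successively_longer_paths (dir_path : String) : Prop :=
  PySem.Str.endswith dir_path "/" = true
instance (dir_path : String) : Decidable (Pre_get_successively_longer_paths dir_path) := by
  unfold Pre_get_successively_longer_paths; infer_instance
def pvWitness_get_successively_longer_paths : String := ("a/b/")

def Spec_get_successively_longer_paths (dir_path : String) (out : List (String × Option String)) : Prop :=
  out = get_successively_longer_paths_alt dir_path
instance (dir_path : String) (out : List (String × Option String)) :
    Decidable (Spec_get_successively_longer_paths dir_path out) := by
  unfold Spec_get_successively_longer_paths; infer_instance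

-- ===== CLAIM (what is proved, stated in full; the proofs are below) =====
def Claim_equal_get_successively_longer_paths : Prop :=
  ∀ (dir_path : String), Dom_get_successively_longer_paths dir_path →
    Pre_get_successively_longer_paths dir_path →
    Spec_get_successively_longer_paths dir_path (get_successively_longer_paths dir_path)

-- ===== LEMMAS AND PROOFS =====

-- reference single-'/' tokeniser (proof-only)
def pvSp : List Char → List (List Char)
  | [] => [[]]
  | c :: r => if c = '/' then [] :: pvSp r
    else (c :: (pvSp r).headD []) :: (pvSp r).tail

theorem pvSp_ne_nil (l : List Char) : pvSp l ≠ [] := by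
  cases l with
  | nil => simp [pvSp]
  | cons c r => simp only [pvSp]; split <;> simp

theorem pvSp_headD_tail (l : List Char) : (pvSp l).headD [] :: (pvSp l).tail = pvSp l := by
  cases hr : pvSp l with
  | nil => exact absurd hr (pvSp_ne_nil l)
  | cons a t => simp

-- flattening the tokens with a trailing '/' reconstructs the string + '/'
theorem pvSp_flat (l : List Char) :
    (pvSp l).flatMap (fun p => p ++ ['/']) = l ++ ['/'] := by
  induction l with
  | nil => simp [pvSp]
  | cons c r ih =>
    simp only [pvSp]
    by_cases hc : c = '/'
    · simp [hc, ih]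
    · simp only [if_neg hc, List.flatMap_cons]
      calc (c :: (pvSp r).headD []) ++ ['/'] ++ ((pvSp r).tail.flatMap fun p => p ++ ['/'])
          = c :: (((pvSp r).headD [] :: (pvSp r).tail).flatMap fun p => p ++ ['/']) := by
            simp [List.flatMap_cons]
        _ = c :: ((pvSp r).flatMap fun p => p ++ ['/']) := by rw [pvSp_headD_tail]
        _ = (c :: r) ++ ['/'] := by rw [ih]; simp

theorem pvSp_no_slash (l : List Char) : ∀ p ∈ pvSp l, '/' ∉ p := by
  induction l with
  | nil => simp [pvSp]
  | cons c r ih =>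
    simp only [pvSp]
    by_cases hc : c = '/'
    · simp only [if_pos hc, List.mem_cons]
      rintro p (rfl | hp)
      · simp
      · exact ih p hp
    · simp only [if_neg hc, List.mem_cons]
      rintro p (rfl | hp)
      · intro hmem
        rcases List.mem_cons.mp hmem with h | h
        · exact hc h.symm
        · have : (pvSp r).headD [] ∈ pvSp r := by
            rcases hq : pvSp r with _ | ⟨a, t2⟩
            · exact absurd hq (pvSp_ne_nil r)
            · simp
          exact ih _ this h
      · exact ih p (List.mem_of_mem_tail hp)

-- PySem's splitOn on separator "/" computes pvSp
theorem pvGo_eq (fuel : Nat) : ∀ (l cur : List Char) (acc : List (List Char)),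
    l.length < fuel →
    PySem.Chars.splitOn.go ['/'] fuel l cur acc =
      acc.reverse ++ (cur.reverse ++ (pvSp l).headD []) :: (pvSp l).tail := by
  induction fuel with
  | zero => intro l cur acc h; omega
  | succ f ih =>
    intro l cur acc h
    cases l with
    | nil => simp [PySem.Chars.splitOn.go, pvSp]
    | cons c rest =>
      by_cases hc : c = '/'
      · subst hc
        have hpre : List.isPrefixOf ['/'] ('/' :: rest) = true := by simp [List.isPrefixOf]
        rw [show PySem.Chars.splitOn.go ['/'] (f+1) ('/' :: rest) cur acc =
              PySem.Chars.splitOn.go ['/'] f (List.drop 1 ('/' :: rest)) [] (cur.reverse :: acc) by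
              simp [PySem.Chars.splitOn.go, hpre]]
        rw [ih _ _ _ (by simpa using Nat.lt_of_succ_lt_succ h)]
        rw [show pvSp ('/' :: rest) = [] :: pvSp rest by simp [pvSp]]
        simp
        rcases hq : pvSp rest with _ | ⟨a, t2⟩
        · exact absurd hq (pvSp_ne_nil rest)
        · simp
      · have hpre : List.isPrefixOf ['/'] (c :: rest) = false := by
          simp [List.isPrefixOf]
          exact fun h => absurd h.symm hc
        rw [show PySem.Chars.splitOn.go ['/'] (f+1) (c :: rest) cur acc =
              PySem.Chars.splitOn.go ['/'] f rest (c :: cur) acc by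
              simp [PySem.Chars.splitOn.go, hpre]]
        rw [ih _ _ _ (by simpa using Nat.lt_of_succ_lt_succ h)]
        simp [pvSp, if_neg hc]

theorem pvSplitOn_eq_sp (l : List Char) : PySem.Chars.splitOn l ['/'] = pvSp l := by
  rw [PySem.Chars.splitOn, pvGo_eq (l.length + 1) l [] [] (by omega)]
  simpa using pvSp_headD_tail l

-- find on p ++ '/' :: t with '/' ∉ p is p.length
theorem pvFind_before_slash (p t : List Char) (hp : '/' ∉ p) :
    PySem.Chars.find (p ++ '/' :: t) ['/'] = (p.length : Int) := by
  set s := p ++ '/' :: t with hs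
  have hinf : ['/'] <:+: s := ⟨p, t, by simp [hs]⟩
  have h0 : (0:Int) ≤ PySem.Chars.find s ['/'] := (PySem.Chars.find_nonneg_iff _ _).mpr hinf
  obtain ⟨hpre, hmin⟩ := PySem.Chars.find_spec h0
  set k := (PySem.Chars.find s ['/']).toNat with hk
  have hks : (PySem.Chars.find s ['/']) = (k : Int) := by omega
  rw [hks]
  congr 1
  by_contra hne
  rcases Nat.lt_or_ge k p.length with hlt | hge
  · -- the found '/' would be inside p
    obtain ⟨u, hu⟩ := hpre
    have hdrop : List.drop k s = '/' :: u := by rw [← hu]; rfl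
    have hklen : k < s.length := by simp [hs]; omega
    have : s[k]'hklen = '/' := by
      have h0' : (List.drop k s)[0]'(by rw [hdrop]; simp) = '/' := by
        simp [hdrop]
      rw [List.getElem_drop] at h0'
      simpa using h0'
    have : p[k]'hlt = '/' := by
      rw [← this]; exact (List.getElem_append_left hlt).symm
    exact hp (this ▸ List.getElem_mem hlt)
  · -- k > p.length contradicts minimality at p.length
    have hplt : p.length < k := by omega
    have : ¬ ['/'] <+: List.drop p.length s := hmin p.length hplt
    exact this (by rw [hs, List.drop_left]; exact ⟨t, rfl⟩)

-- the expected output of both programs over the token list (proof-only)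
def pvExp (pre : List Char) (parent : Option String) :
    List (List Char) → List (String × Option String)
  | [] => []
  | p :: ps =>
    (String.ofList (pre ++ (p ++ ['/'])), parent) ::
      pvExp (pre ++ (p ++ ['/'])) (some (String.ofList (pre ++ (p ++ ['/'])))) ps

theorem pvLoopA_flat (parts : List (List Char)) (hns : ∀ p ∈ parts, '/' ∉ p) :
    ∀ (cur : List Char) (parent : Option String) (acc : List (String × Option String)),
    pvLoopA (parts.flatMap (fun p => p ++ ['/'])) cur parent acc =
      acc ++ pvExp cur parent parts := by
  induction parts with
  | nil =>
    intro cur parent acc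
    rw [pvLoopA]
    have : PySem.Chars.isIn ['/'] ([] : List Char) = false := by decide
    simp [pvExp, this]
  | cons p ps ih =>
    intro cur parent acc
    have hp : '/' ∉ p := hns p List.mem_cons_self
    have hflat : (p :: ps).flatMap (fun q => q ++ ['/']) =
        p ++ '/' :: ps.flatMap (fun q => q ++ ['/']) := by
      simp [List.flatMap_cons]
    rw [pvLoopA, hflat]
    have hin : PySem.Chars.isIn ['/'] (p ++ '/' :: ps.flatMap (fun q => q ++ ['/'])) = true :=
      (PySem.Chars.isIn_iff_infix _ _).mpr ⟨p, ps.flatMap (fun q => q ++ ['/']), by simp⟩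
    rw [dif_pos hin]
    have hfind := pvFind_before_slash p (ps.flatMap (fun q => q ++ ['/'])) hp
    simp only [hfind]
    have hcast : ((p.length : Int) + 1) = ((p.length + 1 : Nat) : Int) := by push_cast; ring
    have hname : PySem.List.slice (p ++ '/' :: ps.flatMap (fun q => q ++ ['/'])) none
        (some ((p.length : Int) + 1)) = p ++ ['/'] := by
      rw [hcast, PySem.List.slice_to_natCast, List.take_append]
      simp
    have hrest : PySem.List.slice (p ++ '/' :: ps.flatMap (fun q => q ++ ['/']))
        (some ((p.length : Int) + 1)) none = ps.flatMap (fun q => q ++ ['/']) := by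
      rw [hcast, PySem.List.slice_from _ (by positivity), List.drop_append]
      simp
    rw [hname, hrest, ih (fun q hq => hns q (List.mem_cons_of_mem p hq))]
    simp [pvExp]

theorem pvExp_length (ps : List (List Char)) :
    ∀ pre parent, (pvExp pre parent ps).length = ps.length := by
  induction ps with
  | nil => intro pre parent; simp [pvExp]
  | cons p t ih => intro pre parent; simp [pvExp, ih]

theorem pvExp_getElem (ps : List (List Char)) :
    ∀ (pre : List Char) (parent : Option String) (i : Nat) (h : i < ps.length),
    (pvExp pre parent ps)[i]'(by rw [pvExp_length]; exact h) =
      (String.ofList (pre ++ (ps.take (i+1)).flatMap (fun p => p ++ ['/'])),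
       if i = 0 then parent
       else some (String.ofList (pre ++ (ps.take i).flatMap (fun p => p ++ ['/'])))) := by
  induction ps with
  | nil => intro pre parent i h; simp at h
  | cons p t ih =>
    intro pre parent i h
    cases i with
    | zero => simp [pvExp]
    | succ j =>
      have hj : j < t.length := by simpa using h
      simp only [pvExp, List.getElem_cons_succ]
      rw [ih _ _ j hj]
      cases j with
      | zero => simp [List.take_succ_cons, List.flatMap_cons]
      | succ m => simp [List.take_succ_cons, List.flatMap_cons]

-- "/".join(l) + "/" flattens the tokens, for nonempty l
theorem pvJoin_flat : ∀ (l : List (List Char)), l ≠ [] →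
    PySem.Chars.join ['/'] l ++ ['/'] = l.flatMap (fun p => p ++ ['/'])
  | [], h => absurd rfl h
  | [x], _ => by simp [PySem.Chars.join, List.intercalate]
  | x :: y :: t, _ => by
    have ih := pvJoin_flat (y :: t) (by simp)
    have hcc : List.intercalate ['/'] (x :: y :: t) =
        x ++ ['/'] ++ List.intercalate ['/'] (y :: t) := by
      simp [List.intercalate, List.intersperse]
    simp only [PySem.Chars.join] at ih ⊢
    rw [hcc, List.flatMap_cons, ← ih]
    simp

-- ===== VERDICT (by name: the statement is the Claim_ definition above) =====
theorem get_successively_longer_paths_spec : Claim_equal_get_successively_longer_paths := by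
  intro d _ hpre
  unfold Pre_get_successively_longer_paths at hpre
  unfold Spec_get_successively_longer_paths
  unfold get_successively_longer_paths get_successively_longer_paths_alt
  rw [if_pos hpre, if_pos hpre]
  -- decompose the string: it ends with '/'
  have hsuf : ['/'] <:+ d.toList := by
    rw [PySem.Str.endswith_eq] at hpre
    have := (PySem.Chars.endswith_iff _ _).mp hpre
    simpa using this
  obtain ⟨p0, hp0⟩ := hsuf
  have hdl : PySem.List.slice d.toList none (some (-1)) = p0 := by
    rw [PySem.List.slice_to_neg_one, ← hp0, List.dropLast_concat]
  rw [hdl, pvSplitOn_eq_sp]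
  set parts := pvSp p0 with hparts
  -- left side: A's loop over the token decomposition
  have hflat : d.toList = parts.flatMap (fun p => p ++ ['/']) := by
    rw [hparts, pvSp_flat, hp0]
  rw [hflat, pvLoopA_flat parts (pvSp_no_slash p0) [] none []]
  rw [List.nil_append]
  -- right side: element-wise
  have hn1 : 1 ≤ parts.length := by
    rcases hq : parts with _ | ⟨a, t⟩
    · exact absurd hq (pvSp_ne_nil p0)
    · simp
  set prefixes := (PySem.List.pyRange 0 (parts.length : Int) 1).map
      (fun i => String.ofList (PySem.Chars.join ['/']
        (PySem.List.slice parts none (some (i + 1))) ++ ['/'])) with hpr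
  have hlenpr : prefixes.length = parts.length := by
    rw [hpr, List.length_map, PySem.List.length_pyRange_one]
    omega
  have hprget? : ∀ (i : Nat), i < parts.length →
      prefixes[i]? = some (String.ofList ((parts.take (i+1)).flatMap (fun p => p ++ ['/']))) := by
    intro i hi
    rw [hpr, List.getElem?_map, PySem.List.getElem?_pyRange_one, if_pos (by omega)]
    have hc : ((0:Int) + (i:Int) + 1) = ((i + 1 : Nat) : Int) := by push_cast; ring
    rw [Option.map_some]
    rw [hc, PySem.List.slice_to_natCast]
    rw [pvJoin_flat _ (by
      intro htk
      have := congrArg List.length htk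
      simp [Nat.min_eq_left (by omega : i + 1 ≤ parts.length)] at this)]
  have hprget : ∀ (i : Nat) (h : i < prefixes.length),
      prefixes[i] = String.ofList ((parts.take (i+1)).flatMap (fun p => p ++ ['/'])) := by
    intro i h
    have h2 := hprget? i (by rw [← hlenpr]; exact h)
    rw [List.getElem?_eq_getElem h] at h2
    exact Option.some.inj h2
  apply List.ext_getElem?
  intro i
  by_cases hi : i < parts.length
  · have hzlen : i < (prefixes.zip ((none : Option String) ::
        (PySem.List.slice prefixes none (some (-1))).map some)).length := by
      rw [List.length_zip, hlenpr, PySem.List.slice_to_neg_one, List.length_cons,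
        List.length_map, List.length_dropLast, hlenpr]
      omega
    rw [List.getElem?_eq_getElem (by rw [pvExp_length]; exact hi),
        List.getElem?_eq_getElem hzlen, List.getElem_zip,
        pvExp_getElem parts [] none i hi, hprget i (by omega)]
    simp only [Option.some.injEq, Prod.mk.injEq, List.nil_append]
    refine ⟨trivial, ?_⟩
    cases i with
    | zero => simp
    | succ j =>
      simp only [PySem.List.slice_to_neg_one]
      simp only [List.getElem_cons_succ, List.getElem_map, List.getElem_dropLast]
      rw [hprget j (by omega)]
      simp
  · rw [List.getElem?_eq_none (by rw [pvExp_length]; omega),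
        List.getElem?_eq_none (by
          rw [List.length_zip, hlenpr]
          omega)]
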